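-- pv_equiv track=rewrite | github.com/omar-essam17/subset-of-c-scanner | TASK2 Parser.py | IsSimpleGrammar
-- ===== SOURCE A (Python) =====
-- def IsSimpleGrammar(grammar):
--     for _, rules in grammar.items():
--         seen_terminals = set()
--         for rule in rules:
--             if not rule:
--                 return False
--             if rule[0].islower():
--                 if rule[0] in seen_terminals:
--                     return False
--                 seen_terminals.add(rule[0])
--             else:
--                 return False
--     return True
-- ===== SOURCE B (Python) =====
-- def IsSimpleGrammar(grammar):
--     for rules in grammar.values():
--         if any(not rule or not rule[0].islower() for rule in rules):
--             return False
--         firsts = sorted(rule[0] for rule in rules)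
--         for a, b in zip(firsts, firsts[1:]):
--             if a == b:
--                 return False
--     return True
-- ===== Notes on version B (the rewrite author's own statement) =====
-- stated objective: alternative
-- what changed: Replaced A's incremental hash-set membership test by a sort-then-adjacent-scan duplicate check: per rule group B first validates every rule in one any() pass, then sorts the first characters and scans consecutive sorted pairs for an equal neighbour, maintaining no set at all.
import Mathlib
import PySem

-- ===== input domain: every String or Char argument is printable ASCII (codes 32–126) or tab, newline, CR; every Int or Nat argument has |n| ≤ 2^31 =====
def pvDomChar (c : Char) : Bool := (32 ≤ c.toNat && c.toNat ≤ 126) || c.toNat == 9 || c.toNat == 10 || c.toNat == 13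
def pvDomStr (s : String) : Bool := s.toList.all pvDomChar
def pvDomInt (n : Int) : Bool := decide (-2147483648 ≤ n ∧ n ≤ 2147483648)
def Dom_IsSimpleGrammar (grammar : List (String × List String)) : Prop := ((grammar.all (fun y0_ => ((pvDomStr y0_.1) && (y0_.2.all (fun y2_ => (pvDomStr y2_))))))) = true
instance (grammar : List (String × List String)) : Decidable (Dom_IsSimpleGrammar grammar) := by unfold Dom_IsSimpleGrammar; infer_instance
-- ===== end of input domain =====

-- B replaces A's incremental seen-set by a sort-then-adjacent-scan duplicate check (objective: alternative).

-- ===== PORT A =====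
-- inner loop of A: walks the rules with the running set seen_terminals, early return False
def pvGoA : List String → PySem.Set Char → Bool
  | [], _ => true
  | r :: rest, seen =>
    if r.toList.isEmpty then false            -- 'if not rule: return False'
    else
      -- rule[0]: total form pyGetD, only reached when the rule is nonempty
      let c := PySem.List.pyGetD r.toList 0 'a'
      if PySem.Chars.islower c then
        if PySem.Set.contains seen c then false
        else pvGoA rest (PySem.Set.add seen c)
      else false

def IsSimpleGrammar : List (String × List String) → Bool
  | [] => true
  | (_, rules) :: rest =>
    if pvGoA rules PySem.Set.empty then IsSimpleGrammar rest else false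

-- ===== PORT B =====
-- B's inner 'for a, b in zip(firsts, firsts[1:]): if a == b: return False'
def pvScanB : List (Char × Char) → Bool
  | [] => true
  | (a, b) :: rest => if a = b then false else pvScanB rest

-- per-group check of B: one any() validation pass, then sort the firsts and scan adjacent pairs
def pvGroupB (rules : List String) : Bool :=
  if rules.any (fun r =>
      r.toList.isEmpty || !PySem.Chars.islower (PySem.List.pyGetD r.toList 0 'a')) then
    false
  else
    -- rule[0]: total form pyGetD, all rules nonempty at this point
    let firsts := PySem.List.sorted (rules.map fun r => PySem.List.pyGetD r.toList 0 'a') (fun c => c) false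
    pvScanB (firsts.zip (firsts.drop 1))

def IsSimpleGrammar_alt : List (String × List String) → Bool
  | [] => true
  | (_, rules) :: rest =>
    if pvGroupB rules then IsSimpleGrammar_alt rest else false

-- ===== PRECONDITION & SPEC =====
def Spec_IsSimpleGrammar (grammar : List (String × List String)) (out : Bool) : Prop := out = IsSimpleGrammar_alt grammar
instance (grammar : List (String × List String)) (out : Bool) : Decidable (Spec_IsSimpleGrammar grammar out) := by unfold Spec_IsSimpleGrammar; infer_instance

-- ===== CLAIM (what is proved, stated in full; the proofs are below) =====
def Claim_equal_IsSimpleGrammar : Prop := ∀ (grammar : List (String × List String)), Dom_IsSimpleGrammar grammar → Spec_IsSimpleGrammar grammar (IsSimpleGrammar grammar)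

-- ===== LEMMAS AND PROOFS =====

theorem pvGoA_iff (rules : List String) (seen : PySem.Set Char) :
    pvGoA rules seen = true ↔
      ((∀ r ∈ rules, r.toList ≠ [] ∧
          PySem.Chars.islower (PySem.List.pyGetD r.toList 0 'a') = true) ∧
        (rules.map (fun r => PySem.List.pyGetD r.toList 0 'a')).Nodup ∧
        ∀ c ∈ rules.map (fun r => PySem.List.pyGetD r.toList 0 'a'), c ∉ seen) := by
  induction rules generalizing seen with
  | nil => simp [pvGoA]
  | cons r rest ih =>
    rcases he : r.toList.isEmpty with _ | _
    · -- the rule is nonempty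
      have hne : r.toList ≠ [] := by
        simp only [List.isEmpty_eq_false_iff] at he; exact he
      rcases hl : PySem.Chars.islower (PySem.List.pyGetD r.toList 0 'a') with _ | _
      · -- first char not lowercase: both sides false
        simp only [pvGoA, he, hl, Bool.false_eq_true, if_false, false_iff]
        rintro ⟨hok, _⟩
        exact Bool.false_ne_true (hl ▸ (hok r (List.mem_cons_self)).2)
      · rcases hs : PySem.Set.contains seen (PySem.List.pyGetD r.toList 0 'a') with _ | _
        · -- first char not yet seen: recurse
          have hnotmem : PySem.List.pyGetD r.toList 0 'a' ∉ seen := by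
            intro hm
            have hc : PySem.Set.contains seen (PySem.List.pyGetD r.toList 0 'a') = true :=
              List.elem_eq_true_of_mem hm
            rw [hs] at hc; exact Bool.false_ne_true hc
          simp only [pvGoA, he, hl, hs, Bool.false_eq_true, if_false, if_true]
          rw [ih]
          simp only [List.map_cons, List.nodup_cons, List.mem_cons, List.mem_map,
            PySem.Set.mem_add]
          constructor
          · rintro ⟨hok, hnd, hmem⟩
            refine ⟨?_, ⟨?_, hnd⟩, ?_⟩
            · rintro x (rfl | hx)
              · exact ⟨hne, hl⟩
              · exact hok x hx
            · rintro ⟨r', hr', heq⟩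
              exact (hmem _ ⟨r', hr', heq⟩) (Or.inr rfl)
            · rintro c (rfl | ⟨r', hr', heq⟩)
              · exact hnotmem
              · exact fun hc => (hmem c ⟨r', hr', heq⟩) (Or.inl hc)
          · rintro ⟨hok, ⟨hnotin, hnd⟩, hmem⟩
            refine ⟨fun x hx => hok x (Or.inr hx), hnd, ?_⟩
            rintro c ⟨r', hr', heq⟩ (hc | rfl)
            · exact (hmem c (Or.inr ⟨r', hr', heq⟩)) hc
            · exact hnotin ⟨r', hr', heq⟩
        · -- first char already seen: both sides false
          have hmem : PySem.List.pyGetD r.toList 0 'a' ∈ seen :=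
            List.mem_of_elem_eq_true hs
          simp only [pvGoA, he, hl, hs, Bool.false_eq_true, if_false, if_true, false_iff]
          rintro ⟨_, _, hnot⟩
          exact (hnot _ (by exact List.mem_cons_self)) hmem
    · -- the rule is empty: both sides false
      have hr : r.toList = [] := List.isEmpty_iff.mp he
      simp only [pvGoA, he, if_true, Bool.false_eq_true, false_iff]
      rintro ⟨hok, _⟩
      exact (hok r List.mem_cons_self).1 hr

-- the adjacent-pair scan succeeds iff no two consecutive elements are equal (Chain' (· ≠ ·))
theorem pvScanB_iff (l : List Char) :
    pvScanB (l.zip (l.drop 1)) = true ↔ l.IsChain (· ≠ ·) := by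
  induction l with
  | nil => simp [pvScanB, List.IsChain.nil]
  | cons a t ih =>
    cases t with
    | nil => simp [pvScanB, List.IsChain.singleton]
    | cons b t' =>
      by_cases hab : a = b
      · simp [pvScanB, hab, List.isChain_cons_cons]
      · simpa [pvScanB, hab, List.isChain_cons_cons] using ih

-- a ≤-sorted list with no equal neighbours is strictly increasing, hence Nodup, and conversely
theorem chain_ne_iff_nodup (l : List Char) (hp : l.Pairwise (· ≤ ·)) :
    l.IsChain (· ≠ ·) ↔ l.Nodup := by
  constructor
  · intro hc
    have hlt : l.IsChain (· < ·) := by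
      have hle : l.IsChain (· ≤ ·) := hp.isChain
      clear hp
      induction l with
      | nil => exact List.IsChain.nil
      | cons a t iht =>
        cases t with
        | nil => exact List.IsChain.singleton a
        | cons b t' =>
          rw [List.isChain_cons_cons] at hc hle ⊢
          exact ⟨lt_of_le_of_ne hle.1 hc.1, iht hc.2 hle.2⟩
    exact (List.isChain_iff_pairwise.mp hlt).imp ne_of_lt
  · intro hnd
    exact (hnd.imp (fun h => h)).isChain

theorem pvGroupB_iff (rules : List String) :
    pvGroupB rules = true ↔
      ((∀ r ∈ rules, r.toList ≠ [] ∧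
          PySem.Chars.islower (PySem.List.pyGetD r.toList 0 'a') = true) ∧
        (rules.map (fun r => PySem.List.pyGetD r.toList 0 'a')).Nodup) := by
  unfold pvGroupB
  rcases hany : rules.any (fun r =>
      r.toList.isEmpty || !PySem.Chars.islower (PySem.List.pyGetD r.toList 0 'a')) with _ | _
  · -- every rule nonempty and lowercase-led
    have hok : ∀ r ∈ rules, r.toList ≠ [] ∧
        PySem.Chars.islower (PySem.List.pyGetD r.toList 0 'a') = true := by
      intro r hr
      rw [List.any_eq_false] at hany
      have := hany r hr
      simp only [Bool.or_eq_true, not_or, Bool.not_eq_true', Bool.not_eq_false] at this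
      exact ⟨by simpa [List.isEmpty_eq_false_iff] using this.1, this.2⟩
    simp only [Bool.false_eq_true, if_false]
    set firsts := rules.map (fun r => PySem.List.pyGetD r.toList 0 'a') with hf
    have hperm : (PySem.List.sorted firsts (fun c => c) false).Perm firsts :=
      PySem.List.sorted_perm firsts (fun c => c) false
    have hpw : (PySem.List.sorted firsts (fun c => c) false).Pairwise (· ≤ ·) :=
      PySem.List.sorted_pairwise firsts (fun c => c)
    rw [pvScanB_iff, chain_ne_iff_nodup _ hpw, hperm.nodup_iff]
    exact (and_iff_right hok).symm
  · -- some rule empty or not lowercase-led: both sides false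
    simp only [if_true, Bool.false_eq_true, false_iff]
    rintro ⟨hok, _⟩
    rw [List.any_eq_true] at hany
    obtain ⟨r, hr, hbad⟩ := hany
    simp only [Bool.or_eq_true, Bool.not_eq_true'] at hbad
    rcases hbad with h | h
    · exact (hok r hr).1 (List.isEmpty_iff.mp h)
    · exact Bool.false_ne_true (h ▸ (hok r hr).2)

theorem pvGroup_eq (rules : List String) :
    pvGoA rules PySem.Set.empty = pvGroupB rules := by
  rcases hb : pvGroupB rules with _ | _
  · rw [Bool.eq_false_iff]
    intro ha
    obtain ⟨hok, hnd, _⟩ := (pvGoA_iff rules PySem.Set.empty).mp ha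
    exact Bool.eq_false_iff.mp hb ((pvGroupB_iff rules).mpr ⟨hok, hnd⟩)
  · obtain ⟨hok, hnd⟩ := (pvGroupB_iff rules).mp hb
    exact (pvGoA_iff rules PySem.Set.empty).mpr
      ⟨hok, hnd, fun c _ h => (List.not_mem_nil (a := c)).elim h⟩

-- ===== VERDICT (by name: the statement is the Claim_ definition above) =====
theorem IsSimpleGrammar_spec : Claim_equal_IsSimpleGrammar := by
  intro grammar hd
  clear hd
  unfold Spec_IsSimpleGrammar
  induction grammar with
  | nil => rfl
  | cons p rest ih =>
    obtain ⟨_, rules⟩ := p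
    simp only [IsSimpleGrammar, IsSimpleGrammar_alt]
    rw [pvGroup_eq, ih]
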